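-- pv_equiv track=rewrite | github.com/hu-ng/EPIJudge | epi_judge_python/snake_string.py | snake_string
-- ===== SOURCE A (Python) =====
-- def snake_string(s: str) -> str:
--     result = []
--
--     # Do this in three iterations
--     # Top row
--     for idx in range(1, len(s), 4):
--         result.append(s[idx])
--
--     # Middle
--     for idx in range(0, len(s), 2):
--         result.append(s[idx])
--
--     # Bottom row
--     for idx in range(3, len(s), 4):
--         result.append(s[idx])
--
--     return "".join(result)
-- ===== SOURCE B (Python) =====
-- def snake_string(s: str) -> str:
--     # Single pass: partition characters into the three rows, then concatenate.
--     top, mid, bot = [], [], []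
--     for i, c in enumerate(s):
--         if i % 4 == 1:
--             top.append(c)
--         elif i % 2 == 0:
--             mid.append(c)
--         else:
--             bot.append(c)
--     return "".join(top + mid + bot)
-- ===== Notes on version B (the rewrite author's own statement) =====
-- stated objective: alternative
-- what changed: Replaces A's three separate index-range scans over s with one pass over enumerate(s) that buckets each character into top/middle/bottom lists by i mod 4, joining the buckets at the end.
import Mathlib
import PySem

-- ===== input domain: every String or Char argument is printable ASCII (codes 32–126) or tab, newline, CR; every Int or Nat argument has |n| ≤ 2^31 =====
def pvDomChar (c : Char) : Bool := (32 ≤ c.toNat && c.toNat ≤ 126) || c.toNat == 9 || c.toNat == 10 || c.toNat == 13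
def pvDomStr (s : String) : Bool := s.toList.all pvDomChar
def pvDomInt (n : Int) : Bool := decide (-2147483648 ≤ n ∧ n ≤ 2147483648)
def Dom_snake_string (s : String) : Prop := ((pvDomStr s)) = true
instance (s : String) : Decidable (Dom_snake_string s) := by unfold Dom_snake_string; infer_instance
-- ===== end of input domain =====

-- snake_string: B does one pass over enumerate(s), bucketing characters into top/middle/bottom
-- lists by index mod 4, instead of A's three separate index-range scans. Same result, same cost.


-- ===== PORT A =====
-- Three loops 'for idx in range(a, len(s), step): result.append(s[idx])'.
-- s[idx] is ported as (pyGet? … idx).toList: the index produced by the range is always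
-- in bounds, so the option is always 'some' and exactly one character is appended.
def snake_string (s : String) : String :=
  let l := s.toList
  let result : List Char :=
    (PySem.List.pyRange 1 (l.length : Int) 4).foldl
      (fun res idx => res ++ (PySem.List.pyGet? l idx).toList) []
  let result :=
    (PySem.List.pyRange 0 (l.length : Int) 2).foldl
      (fun res idx => res ++ (PySem.List.pyGet? l idx).toList) result
  let result :=
    (PySem.List.pyRange 3 (l.length : Int) 4).foldl
      (fun res idx => res ++ (PySem.List.pyGet? l idx).toList) result
  String.ofList result

-- ===== PORT B =====
-- One pass over enumerate(s); each character goes into one of three buckets by its index.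
def snakeStep (acc : List Char × List Char × List Char) (p : Int × Char) :
    List Char × List Char × List Char :=
  if PySem.Int.mod p.1 4 = 1 then (acc.1 ++ [p.2], acc.2.1, acc.2.2)
  else if PySem.Int.mod p.1 2 = 0 then (acc.1, acc.2.1 ++ [p.2], acc.2.2)
  else (acc.1, acc.2.1, acc.2.2 ++ [p.2])

def snake_string_alt (s : String) : String :=
  let r := (PySem.List.enumerate s.toList 0).foldl snakeStep ([], [], [])
  String.ofList (r.1 ++ r.2.1 ++ r.2.2)

-- ===== PRECONDITION & SPEC =====
def Spec_snake_string (s : String) (out : String) : Prop := out = snake_string_alt s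
instance (s : String) (out : String) : Decidable (Spec_snake_string s out) := by unfold Spec_snake_string; infer_instance

-- ===== CLAIM (what is proved, stated in full; the proofs are below) =====
def Claim_equal_snake_string : Prop := ∀ (s : String), Dom_snake_string s → Spec_snake_string s (snake_string s)

-- ===== LEMMAS AND PROOFS =====

-- A's loop shape: appending (g i).toList for each i is init ++ flatMap.
theorem foldl_append_optToList {α β : Type} (g : α → Option β) :
    ∀ (xs : List α) (init : List β),
      xs.foldl (fun res i => res ++ (g i).toList) init
        = init ++ xs.flatMap (fun i => (g i).toList) := by
  intro xs
  induction xs with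
  | nil => intro init; simp
  | cons x xs ih => intro init; simp [List.foldl_cons, ih]

-- The value of one of A's scans, as a function of the list.
def snakeF (a s : Int) (l : List Char) : List Char :=
  (PySem.List.pyRange a (l.length : Int) s).flatMap
    (fun i => (PySem.List.pyGet? l i).toList)

theorem pyRange_snoc (a s : Int) (hs : 0 < s) (n : Nat) :
    PySem.List.pyRange a ((n : Int) + 1) s
      = PySem.List.pyRange a (n : Int) s
        ++ (if a ≤ (n : Int) ∧ ((n : Int) - a) % s = 0 then [(n : Int)] else []) := by
  rw [PySem.List.pyRange_of_pos _ _ hs, PySem.List.pyRange_of_pos _ _ hs]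
  by_cases hc : a ≤ (n : Int) ∧ ((n : Int) - a) % s = 0
  · rw [if_pos hc]
    obtain ⟨han, hmod⟩ := hc
    have hdecomp := Int.mul_ediv_add_emod ((n : Int) - a) s
    set q : Int := ((n : Int) - a) / s with hqdef
    have hq : (n : Int) - a = s * q := by rw [hmod] at hdecomp; linarith
    have hq0 : 0 ≤ q := Int.ediv_nonneg (by omega) (le_of_lt hs)
    have e1 : (n : Int) + 1 - a + s - 1 = s * (q + 1) := by rw [mul_add, mul_one]; linarith
    have hc1 : ((n : Int) + 1 - a + s - 1) / s = q + 1 := by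
      rw [e1, Int.mul_ediv_cancel_left _ (ne_of_gt hs)]
    have hc0 : (if a < (n : Int) then (((n : Int) - a + s - 1) / s).toNat else 0) = q.toNat := by
      by_cases han' : a < (n : Int)
      · rw [if_pos han']
        have e0 : (n : Int) - a + s - 1 = (s - 1) + s * q := by linarith
        rw [e0, Int.add_mul_ediv_left _ q (ne_of_gt hs),
            Int.ediv_eq_zero_of_lt (by omega) (by omega), zero_add]
      · have hna : (n : Int) = a := by omega
        have hsq : s * q = 0 := by rw [← hq, hna]; ring
        have : q = 0 := by
          rcases mul_eq_zero.mp hsq with h | h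
          · exact absurd h (ne_of_gt hs)
          · exact h
        rw [if_neg han', this]
        rfl
    rw [if_pos (by omega : a < (n : Int) + 1), hc1, hc0]
    have hqt : (q + 1).toNat = q.toNat + 1 := by omega
    rw [hqt, List.range_succ, List.map_append]
    congr 1
    simp only [List.map_cons, List.map_nil]
    have : a + s * (q.toNat : Int) = (n : Int) := by
      have : (q.toNat : Int) = q := by omega
      rw [this]; linarith
    rw [this]
  · rw [if_neg hc, List.append_nil]
    by_cases han : a ≤ (n : Int)
    · have hmod : ((n : Int) - a) % s ≠ 0 := fun h => hc ⟨han, h⟩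
      have hdecomp := Int.mul_ediv_add_emod ((n : Int) - a) s
      set q : Int := ((n : Int) - a) / s with hqdef
      set r : Int := ((n : Int) - a) % s with hrdef
      have hr0 : 0 ≤ r := Int.emod_nonneg _ (ne_of_gt hs)
      have hrs : r < s := Int.emod_lt_of_pos _ hs
      have hrpos : 0 < r := lt_of_le_of_ne hr0 (Ne.symm hmod)
      have hq0 : 0 ≤ q := Int.ediv_nonneg (by omega) (le_of_lt hs)
      have hsq : 0 ≤ s * q := mul_nonneg (le_of_lt hs) hq0
      have han' : a < (n : Int) := by omega
      have e1 : (n : Int) + 1 - a + s - 1 = r + s * (q + 1) := by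
        rw [mul_add, mul_one]; linarith
      have hc1 : ((n : Int) + 1 - a + s - 1) / s = q + 1 := by
        rw [e1, Int.add_mul_ediv_left _ (q + 1) (ne_of_gt hs),
            Int.ediv_eq_zero_of_lt hr0 hrs, zero_add]
      have e0 : (n : Int) - a + s - 1 = (r - 1) + s * (q + 1) := by
        rw [mul_add, mul_one]; linarith
      have hc0 : ((n : Int) - a + s - 1) / s = q + 1 := by
        rw [e0, Int.add_mul_ediv_left _ (q + 1) (ne_of_gt hs),
            Int.ediv_eq_zero_of_lt (by omega) (by omega), zero_add]
      rw [if_pos (by omega : a < (n : Int) + 1), if_pos han', hc1, hc0]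
    · rw [if_neg (by omega : ¬ a < (n : Int) + 1), if_neg (by omega : ¬ a < (n : Int))]

theorem pyGet?_append_singleton_lt (l : List Char) (x : Char) (i : Int)
    (h0 : 0 ≤ i) (h1 : i < l.length) :
    PySem.List.pyGet? (l ++ [x]) i = PySem.List.pyGet? l i := by
  rw [PySem.List.pyGet?_of_nonneg _ h0, PySem.List.pyGet?_of_nonneg _ h0]
  rw [List.getElem?_append_left (by omega)]

theorem snakeF_snoc (a s : Int) (hs : 0 < s) (ha : 0 ≤ a) (l : List Char) (x : Char) :
    snakeF a s (l ++ [x])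
      = snakeF a s l
        ++ (if a ≤ (l.length : Int) ∧ ((l.length : Int) - a) % s = 0 then [x] else []) := by
  unfold snakeF
  have hlen : ((l ++ [x]).length : Int) = (l.length : Int) + 1 := by simp
  rw [hlen, pyRange_snoc a s hs l.length, List.flatMap_append]
  congr 1
  · apply List.flatMap_congr
    intro i hi
    rw [PySem.List.mem_pyRange_iff_of_pos hs] at hi
    exact congrArg Option.toList (pyGet?_append_singleton_lt l x i (by omega) (by omega))
  · split
    · simp
    · simp

theorem snake_fold_eq (l : List Char) :
    (PySem.List.enumerate l 0).foldl snakeStep ([], [], [])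
      = (snakeF 1 4 l, snakeF 0 2 l, snakeF 3 4 l) := by
  induction l using List.reverseRecOn with
  | nil => simp [PySem.List.enumerate, snakeF, PySem.List.pyRange]
  | append_singleton l x ih =>
    rw [PySem.List.enumerate_append, List.foldl_append, ih]
    have hen : PySem.List.enumerate [x] (0 + (l.length : Int)) = [((l.length : Int), x)] := by
      simp [PySem.List.enumerate]
    rw [hen]
    simp only [List.foldl_cons, List.foldl_nil]
    rw [snakeF_snoc 1 4 (by norm_num) (by norm_num) l x,
        snakeF_snoc 0 2 (by norm_num) (by norm_num) l x,
        snakeF_snoc 3 4 (by norm_num) (by norm_num) l x]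
    have h4 : PySem.Int.mod (l.length : Int) 4 = (l.length : Int) % 4 :=
      PySem.Int.mod_eq_emod_of_pos (by norm_num)
    have h2 : PySem.Int.mod (l.length : Int) 2 = (l.length : Int) % 2 :=
      PySem.Int.mod_eq_emod_of_pos (by norm_num)
    unfold snakeStep
    simp only [h4, h2]
    split_ifs <;> first | (simp; done) | (exfalso; omega)

-- ===== VERDICT (by name: the statement is the Claim_ definition above) =====
theorem snake_string_spec : Claim_equal_snake_string := by
  intro s _
  unfold Spec_snake_string snake_string snake_string_alt
  rw [snake_fold_eq s.toList]
  simp only [foldl_append_optToList, List.nil_append, List.append_assoc]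
  rfl
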